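-- pv_equiv track=rewrite | github.com/cxaexeong/codingtest-practice | 프로그래머스/1/140108. 문자열 나누기/문자열 나누기.py | solution
-- ===== SOURCE A (Python) =====
-- def solution(s):
--     same_count = 0
--     diff_count = 0
--     result = 0
--     first_char = None
--
--     for char in s:
--         if first_char is None:  # 기준 문자 설정
--             first_char = char
--
--         if char == first_char:
--             same_count += 1
--         else:
--             diff_count += 1
--
--         if same_count == diff_count:  # 나눌 조건 충족
--             result += 1
--             same_count = 0
--             diff_count = 0
--             first_char = None  # 기준 문자 초기화
--
--     # 남은 문자가 있을 경우 한 덩어리로 추가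
--     if same_count != 0 or diff_count != 0:
--         result += 1
--
--     return result
-- ===== SOURCE B (Python) =====
-- def solution(s):
--     # Stack-based matching: a group's stack holds copies of its base character.
--     # An empty stack means a new group starts (count it); a matching char pushes,
--     # a non-matching char pops; the stack emptying ends the group.
--     stack = []
--     result = 0
--     for c in s:
--         if not stack:
--             result += 1
--             stack.append(c)
--         elif c == stack[-1]:
--             stack.append(c)
--         else:
--             stack.pop()
--     return result
-- ===== Notes on version B (the rewrite author's own statement) =====
-- stated objective: alternative
-- what changed: Replaced A's four-piece state (same/diff counters, first_char sentinel, reset + leftover patch) by a bracket-matching stack: an empty stack starts a new group (counted then), a char equal to the stack top pushes, any other char pops, and the stack emptying ends the group.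
import Mathlib
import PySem

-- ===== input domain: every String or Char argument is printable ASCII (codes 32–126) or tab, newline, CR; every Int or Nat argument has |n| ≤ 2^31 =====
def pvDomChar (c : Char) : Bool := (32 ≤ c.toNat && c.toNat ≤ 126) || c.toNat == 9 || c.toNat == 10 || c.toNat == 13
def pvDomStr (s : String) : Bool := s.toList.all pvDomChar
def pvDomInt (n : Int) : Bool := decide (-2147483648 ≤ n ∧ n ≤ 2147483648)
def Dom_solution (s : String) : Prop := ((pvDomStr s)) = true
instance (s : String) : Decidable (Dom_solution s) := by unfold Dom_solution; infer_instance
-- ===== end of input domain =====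

-- B replaces A's counter machinery (same/diff counters, first_char sentinel, reset and
-- leftover patch) by a bracket-matching stack: empty stack = new group (counted at its
-- start), matching char pushes, other chars pop, stack emptying ends the group.

-- ===== PORT A =====
-- state = (same_count, diff_count, result, first_char); one fold step per character of s
def solutionStep (st : Int × Int × Int × Option Char) (c : Char) :
    Int × Int × Int × Option Char :=
  match st with
  | (sm, df, r, fc0) =>
    -- "if first_char is None: first_char = char"
    let f : Char := match fc0 with
      | none => c
      | some f => f
    -- "if char == first_char: same_count += 1 else: diff_count += 1",
    -- then "if same_count == diff_count: result += 1; reset"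
    if c = f then
      if sm + 1 = df then (0, 0, r + 1, none) else (sm + 1, df, r, some f)
    else
      if sm = df + 1 then (0, 0, r + 1, none) else (sm, df + 1, r, some f)

def solutionFinish (st : Int × Int × Int × Option Char) : Int :=
  if st.1 ≠ 0 ∨ st.2.1 ≠ 0 then st.2.2.1 + 1 else st.2.2.1

def solution (s : String) : Int :=
  solutionFinish (s.toList.foldl solutionStep (0, 0, 0, none))

-- ===== PORT B =====
-- state = (stack, result).  The Lean list's HEAD is the Python stack's END (its top):
-- Python appends to / inspects / pops only the end, so this is exact.
def altStep (st : List Char × Int) (c : Char) : List Char × Int :=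
  match st with
  | ([], r) => ([c], r + 1)                              -- "if not stack: result += 1; stack.append(c)"
  | (t :: rest, r) =>
    if c = t then (c :: t :: rest, r)                    -- "elif c == stack[-1]: stack.append(c)"
    else (rest, r)                                       -- "else: stack.pop()"

def solution_alt (s : String) : Int :=
  (s.toList.foldl altStep ([], 0)).2

-- ===== PRECONDITION & SPEC =====
def Spec_solution (s : String) (out : Int) : Prop := out = solution_alt s
instance (s : String) (out : Int) : Decidable (Spec_solution s out) := by unfold Spec_solution; infer_instance

-- ===== CLAIM (what is proved, stated in full; the proofs are below) =====
def Claim_equal_solution : Prop := ∀ (s : String), Dom_solution s → Spec_solution s (solution s)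

-- ===== LEMMAS AND PROOFS =====

-- Combined invariant, by induction on the remaining list:
-- (i) mid-group: A's counters satisfy sm - df = k + 1 (base char f), which corresponds to
--     B's stack holding k+1 copies of f and B's result already counting the open group;
-- (ii) at a group boundary: A's fresh state corresponds to B's empty stack, equal results.
theorem fold_invariant :
    ∀ l : List Char,
      ((∀ (sm df r : Int) (f : Char) (k : Nat), sm - df = (k : Int) + 1 →
          solutionFinish (l.foldl solutionStep (sm, df, r, some f)) =
            (l.foldl altStep (f :: List.replicate k f, r + 1)).2) ∧
       (∀ r : Int,
          solutionFinish (l.foldl solutionStep (0, 0, r, none)) =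
            (l.foldl altStep ([], r)).2)) := by
  intro l
  induction l with
  | nil =>
    constructor
    · intro sm df r f k hk
      have hor : sm ≠ 0 ∨ df ≠ 0 := by
        by_contra h
        push Not at h
        rw [h.1, h.2] at hk
        omega
      simp [solutionFinish, hor]
    · intro r
      simp [solutionFinish]
  | cons c rest ih =>
    constructor
    · intro sm df r f k hk
      simp only [List.foldl_cons, solutionStep, altStep]
      by_cases hc : c = f
      · -- matching char: A increments same_count, B pushes
        have hnb : ¬ (sm + 1 = df) := by omega
        subst hc
        simp only [if_neg hnb]
        have := ih.1 (sm + 1) df r c (k + 1) (by push_cast; omega)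
        simpa [List.replicate_succ] using this
      · -- other char: A increments diff_count (cut iff sm = df + 1), B pops
        simp only [if_neg hc]
        by_cases hb : sm = df + 1
        · -- group ends: k = 0, B's pop empties the stack
          have hk0 : k = 0 := by omega
          subst hk0
          simp only [if_pos hb, List.replicate_zero]
          exact ih.2 (r + 1)
        · -- group continues: k = k' + 1
          have hk1 : 1 ≤ k := by omega
          obtain ⟨k', rfl⟩ : ∃ k', k = k' + 1 := ⟨k - 1, by omega⟩
          simp only [if_neg hb, List.replicate_succ]
          exact ih.1 sm (df + 1) r f k' (by push_cast at hk ⊢; omega)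
    · intro r
      simp only [List.foldl_cons, solutionStep, altStep]
      have h10 : ¬ ((0 : Int) + 1 = 0) := by omega
      simp only [if_neg h10]
      have := ih.1 1 0 r c 0 (by omega)
      simpa using this

-- ===== VERDICT (by name: the statement is the Claim_ definition above) =====
theorem solution_spec : Claim_equal_solution := by
  intro s _
  unfold Spec_solution solution solution_alt
  exact (fold_invariant s.toList).2 0
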